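-- pv_equiv track=rewrite | github.com/suaveshot/americal-patrol-vps | shared_utils/push_heartbeat.py | _has_errors
-- ===== SOURCE A (Python) =====
-- def _has_errors(lines: list[str]) -> bool:
--     last_run_start = 0
--     for i, line in enumerate(lines):
--         if "Starting" in line or "Audit started" in line or "begin" in line.lower():
--             last_run_start = i
--     for line in lines[last_run_start:]:
--         upper = line.upper()
--         if "ERROR:" in upper or "TRACEBACK" in upper:
--             return True
--     return False
-- ===== SOURCE B (Python) =====
-- def _has_errors(lines: list[str]) -> bool:
--     err = False
--     for line in reversed(lines):
--         upper = line.upper()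
--         if "ERROR:" in upper or "TRACEBACK" in upper:
--             err = True
--         if "Starting" in line or "Audit started" in line or "begin" in line.lower():
--             return err
--     return err
-- ===== Notes on version B (the rewrite author's own statement) =====
-- stated objective: alternative
-- what changed: Replaces A's two forward passes (one to find the last run-start index, one to scan the suffix for errors) by a single backward pass that accumulates the error flag and stops at the first start marker seen from the end.
import Mathlib
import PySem

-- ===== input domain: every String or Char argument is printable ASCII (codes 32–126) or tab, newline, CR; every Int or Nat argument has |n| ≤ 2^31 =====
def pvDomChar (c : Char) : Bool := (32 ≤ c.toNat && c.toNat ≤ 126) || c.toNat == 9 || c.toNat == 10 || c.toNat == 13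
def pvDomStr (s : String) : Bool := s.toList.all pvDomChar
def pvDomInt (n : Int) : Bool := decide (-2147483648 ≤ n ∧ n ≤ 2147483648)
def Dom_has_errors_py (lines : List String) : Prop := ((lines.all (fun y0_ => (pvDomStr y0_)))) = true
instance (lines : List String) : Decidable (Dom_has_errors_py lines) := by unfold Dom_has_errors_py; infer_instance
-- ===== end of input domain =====

-- B replaces A's two forward passes with a single backward pass that stops at the last run-start marker (alternative decomposition, same cost).

-- ===== PORT A =====
def has_errors_py (lines : List String) : Bool :=
  let last_run_start : Int :=
    (PySem.List.enumerate lines 0).foldl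
      (fun acc p =>
        if PySem.Str.isIn "Starting" p.2 || PySem.Str.isIn "Audit started" p.2 ||
           PySem.Str.isIn "begin" (PySem.Str.lower p.2) then p.1 else acc) 0
  (PySem.List.slice lines (some last_run_start) none).any
    (fun line =>
      let upper := PySem.Str.upper line
      PySem.Str.isIn "ERROR:" upper || PySem.Str.isIn "TRACEBACK" upper)

-- ===== PORT B =====
def has_errors_py_alt_go : List String → Bool → Bool
  | [], err => err
  | line :: rest, err =>
    let upper := PySem.Str.upper line
    let err' := err || (PySem.Str.isIn "ERROR:" upper || PySem.Str.isIn "TRACEBACK" upper)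
    if PySem.Str.isIn "Starting" line || PySem.Str.isIn "Audit started" line ||
       PySem.Str.isIn "begin" (PySem.Str.lower line) then err'
    else has_errors_py_alt_go rest err'

def has_errors_py_alt (lines : List String) : Bool :=
  has_errors_py_alt_go lines.reverse false

-- ===== PRECONDITION & SPEC =====
def Spec_has_errors_py (lines : List String) (out : Bool) : Prop := out = has_errors_py_alt lines
instance (lines : List String) (out : Bool) : Decidable (Spec_has_errors_py lines out) := by unfold Spec_has_errors_py; infer_instance

-- ===== CLAIM (what is proved, stated in full; the proofs are below) =====
def Claim_equal_has_errors_py : Prop := ∀ (lines : List String), Dom_has_errors_py lines → Spec_has_errors_py lines (has_errors_py lines)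

-- ===== LEMMAS AND PROOFS =====

/-- the run-start test of both programs -/
def pvStart (line : String) : Bool :=
  PySem.Str.isIn "Starting" line || PySem.Str.isIn "Audit started" line ||
    PySem.Str.isIn "begin" (PySem.Str.lower line)

/-- the error test of both programs -/
def pvErr (line : String) : Bool :=
  PySem.Str.isIn "ERROR:" (PySem.Str.upper line) || PySem.Str.isIn "TRACEBACK" (PySem.Str.upper line)

/-- A's first loop: index of the last run-start line (0 if none) -/
def pvLastA (lines : List String) : Int :=
  (PySem.List.enumerate lines 0).foldl (fun acc p => if pvStart p.2 then p.1 else acc) 0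

theorem pv_enumerate_append {α : Type} (xs : List α) (x : α) (s : Int) :
    PySem.List.enumerate (xs ++ [x]) s = PySem.List.enumerate xs s ++ [(s + xs.length, x)] := by
  induction xs generalizing s with
  | nil => simp [PySem.List.enumerate_nil, PySem.List.enumerate_cons]
  | cons y ys ih =>
      simp [PySem.List.enumerate_cons, ih]
      ring_nf

theorem pv_hasA (lines : List String) :
    has_errors_py lines = (PySem.List.slice lines (some (pvLastA lines)) none).any pvErr := rfl

theorem pv_lastA_append (xs : List String) (x : String) :
    pvLastA (xs ++ [x]) = if pvStart x then (xs.length : Int) else pvLastA xs := by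
  unfold pvLastA
  rw [pv_enumerate_append, List.foldl_append]
  simp

theorem pv_lastA_bounds (xs : List String) : 0 ≤ pvLastA xs ∧ pvLastA xs ≤ xs.length := by
  induction xs using List.reverseRecOn with
  | nil => simp [pvLastA, PySem.List.enumerate_nil]
  | append_singleton ys y ih =>
      rw [pv_lastA_append]
      by_cases h : pvStart y = true
      · simp [h]
      · simp [h]; omega

theorem pv_go_or (rest : List String) (err : Bool) :
    has_errors_py_alt_go rest err = (err || has_errors_py_alt_go rest false) := by
  induction rest generalizing err with
  | nil => simp [has_errors_py_alt_go]
  | cons l ls ih =>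
      simp only [has_errors_py_alt_go]
      split
      · cases err <;> simp
      · rw [ih, ih (false || _)]
        cases err <;> simp [Bool.or_assoc]

theorem pv_main (lines : List String) : has_errors_py lines = has_errors_py_alt lines := by
  induction lines using List.reverseRecOn with
  | nil => decide
  | append_singleton xs x ih =>
      rw [pv_hasA, pv_lastA_append]
      have hrev : (xs ++ [x]).reverse = x :: xs.reverse := by simp
      by_cases h : pvStart x = true
      · -- last marker is x itself
        simp only [h, if_pos]
        rw [show ((xs.length : Int)) = ((xs.length : Nat) : Int) from rfl,
          PySem.List.slice_from_natCast]
        have hbdrop : (xs ++ [x]).drop xs.length = [x] := by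
          simp
        rw [hbdrop]
        unfold has_errors_py_alt
        rw [hrev]
        simp only [has_errors_py_alt_go]
        simp [pvStart] at h
        simp [h, pvErr]
      · simp only [h, if_neg, Bool.false_eq_true, not_false_iff]
        have hb := pv_lastA_bounds xs
        rw [PySem.List.slice_from _ hb.1]
        have hd : (xs ++ [x]).drop (pvLastA xs).toNat = xs.drop (pvLastA xs).toNat ++ [x] := by
          rw [List.drop_append_of_le_length (by omega)]
        rw [hd, List.any_append]
        have hA : (xs.drop (pvLastA xs).toNat).any pvErr = has_errors_py xs := by
          rw [pv_hasA, PySem.List.slice_from _ hb.1]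
        rw [hA, ih]
        simp only [List.any_cons, List.any_nil, Bool.or_false]
        unfold has_errors_py_alt
        rw [hrev]
        rw [show has_errors_py_alt_go (x :: xs.reverse) false
              = has_errors_py_alt_go xs.reverse (false || pvErr x) from by
          simp only [has_errors_py_alt_go]
          have hc : ¬ ((PySem.Str.isIn "Starting" x || PySem.Str.isIn "Audit started" x ||
              PySem.Str.isIn "begin" (PySem.Str.lower x)) = true) := h
          rw [if_neg hc]
          rfl]
        rw [pv_go_or]
        simp only [Bool.false_or]
        rw [pv_go_or xs.reverse (pvErr x)]
        simp [Bool.or_comm]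

-- ===== VERDICT (by name: the statement is the Claim_ definition above) =====
theorem has_errors_py_spec : Claim_equal_has_errors_py := by
  intro lines _
  unfold Spec_has_errors_py
  exact pv_main lines
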